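-- pv_equiv track=rewrite | github.com/PavelD1989/tms_aqa_python_pytest | HW_18/HW_18.py | count_and_sum_number
-- ===== SOURCE A (Python) =====
-- def count_and_sum_number(number: int):
--     sum_of_numbers = 0
--     count_of_numbers = 0
--     while number > 0:
--         sum_of_numbers += number % 10
--         number //= 10
--         count_of_numbers += 1
--     return sum_of_numbers, count_of_numbers
-- ===== SOURCE B (Python) =====
-- def count_and_sum_number(number: int):
--     s = str(number) if number > 0 else ""
--     return sum(int(c) for c in s), len(s)
-- ===== Notes on version B (the rewrite author's own statement) =====
-- stated objective: idiomatic
-- what changed: Replaces the arithmetic digit-peeling loop (modulo and floor division) with a single str() conversion and a sum/len over the decimal characters.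
import Mathlib
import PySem

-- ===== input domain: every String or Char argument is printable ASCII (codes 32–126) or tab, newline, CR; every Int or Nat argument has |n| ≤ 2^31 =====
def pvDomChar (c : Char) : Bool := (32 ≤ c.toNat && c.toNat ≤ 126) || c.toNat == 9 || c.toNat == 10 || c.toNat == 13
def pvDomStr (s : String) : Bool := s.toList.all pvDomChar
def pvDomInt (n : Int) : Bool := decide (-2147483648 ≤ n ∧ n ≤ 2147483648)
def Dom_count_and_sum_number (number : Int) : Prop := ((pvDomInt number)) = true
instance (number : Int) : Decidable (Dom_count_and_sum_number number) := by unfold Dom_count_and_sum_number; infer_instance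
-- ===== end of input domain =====

-- B replaces the arithmetic digit-peeling loop with one str() conversion and sum/len over its characters (idiomatic; same cost).

-- ===== PORT A =====
-- while loop: add the last decimal digit, drop it by floor division, bump the count
def countLoopA (number s c : Int) : Int × Int :=
  if h : number > 0 then
    countLoopA (PySem.Int.floordiv number 10) (s + PySem.Int.mod number 10) (c + 1)
  else (s, c)
termination_by number.toNat
decreasing_by
  rw [PySem.Int.floordiv_eq_ediv_of_pos (by norm_num)]
  omega

def count_and_sum_number (number : Int) : Int × Int :=
  countLoopA number 0 0

-- ===== PORT B =====
-- s = str(number) if number > 0 else ""; return sum(int(c) for c in s), len(s)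
-- int(c) is ported as PySem.Int.ofChars? [c]; on the digit characters produced here it never raises,
-- so the .getD 0 default is unreachable.
def count_and_sum_number_alt (number : Int) : Int × Int :=
  let s : List Char := if number > 0 then PySem.Int.toChars number else []
  ((s.map (fun ch => (PySem.Int.ofChars? [ch]).getD 0)).sum, (s.length : Int))

-- ===== PRECONDITION & SPEC =====
def Spec_count_and_sum_number (number : Int) (out : Int × Int) : Prop := out = count_and_sum_number_alt number
instance (number : Int) (out : Int × Int) : Decidable (Spec_count_and_sum_number number out) := by unfold Spec_count_and_sum_number; infer_instance

-- ===== CLAIM (what is proved, stated in full; the proofs are below) =====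
def Claim_equal_count_and_sum_number : Prop := ∀ (number : Int), Dom_count_and_sum_number number → Spec_count_and_sum_number number (count_and_sum_number number)

-- ===== LEMMAS AND PROOFS =====

-- reversed decimal digit characters of n (empty for 0); what Nat.toDigits 10 computes for positive n
def digChars (n : Nat) : List Char :=
  if n = 0 then [] else digChars (n / 10) ++ [Nat.digitChar (n % 10)]
decreasing_by rename_i h; exact Nat.div_lt_self (Nat.pos_of_ne_zero h) (by norm_num)

lemma digChars_pos (n : Nat) (h : n ≠ 0) :
    digChars n = digChars (n / 10) ++ [Nat.digitChar (n % 10)] := by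
  rw [digChars, if_neg h]

lemma toDigitsCore_eq_digChars : ∀ (fuel n : Nat) (acc : List Char), 0 < n → n < fuel →
    Nat.toDigitsCore 10 fuel n acc = digChars n ++ acc := by
  intro fuel
  induction fuel with
  | zero => intro n acc h1 h2; omega
  | succ f ih =>
    intro n acc h1 h2
    rw [Nat.toDigitsCore]
    by_cases hd : n / 10 = 0
    · simp only [hd, if_true]
      rw [digChars, if_neg (by omega), digChars, if_pos hd]
      simp
    · simp only [hd, if_false]
      rw [ih (n / 10) _ (Nat.pos_of_ne_zero hd)
        (by have := Nat.div_lt_self h1 (by norm_num : 1 < 10); omega)]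
      rw [digChars_pos n (by omega)]
      simp

lemma toDigits_eq_digChars (n : Nat) (h : 0 < n) : Nat.toDigits 10 n = digChars n := by
  have := toDigitsCore_eq_digChars (n + 1) n [] h (by omega)
  simpa [Nat.toDigits] using this

lemma ofChars_digitChar (r : Nat) (hr : r < 10) :
    (PySem.Int.ofChars? [Nat.digitChar r]).getD 0 = (r : Int) := by
  interval_cases r <;> decide

lemma countLoopA_eq_digChars (m : Nat) : ∀ (s c : Int),
    countLoopA (m : Int) s c =
      (s + ((digChars m).map (fun ch => (PySem.Int.ofChars? [ch]).getD 0)).sum,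
       c + ((digChars m).length : Int)) := by
  induction m using Nat.strong_induction_on with
  | _ m ih =>
    intro s c
    by_cases hm : m = 0
    · subst hm
      rw [countLoopA, dif_neg (by omega), digChars, if_pos rfl]
      simp
    · rw [countLoopA, dif_pos (by exact_mod_cast Nat.pos_of_ne_zero hm)]
      rw [PySem.Int.floordiv_eq_ediv_of_pos (by norm_num),
        PySem.Int.mod_eq_emod_of_pos (by norm_num)]
      rw [show (m : Int) / 10 = ((m / 10 : Nat) : Int) by omega,
        show (m : Int) % 10 = ((m % 10 : Nat) : Int) by omega]
      rw [ih (m / 10) (Nat.div_lt_self (Nat.pos_of_ne_zero hm) (by norm_num)) _ _]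
      rw [digChars_pos m hm]
      simp [ofChars_digitChar (m % 10) (Nat.mod_lt m (by norm_num))]
      constructor <;> ring

-- ===== VERDICT (by name: the statement is the Claim_ definition above) =====
theorem count_and_sum_number_spec : Claim_equal_count_and_sum_number := by
  intro number _
  unfold Spec_count_and_sum_number count_and_sum_number count_and_sum_number_alt
  by_cases h : number > 0
  · simp only [if_pos h]
    have hn : number = ((number.toNat : Nat) : Int) := by omega
    rw [hn, countLoopA_eq_digChars]
    have hpos : 0 < number.toNat := by omega
    have hch : PySem.Int.toChars ((number.toNat : Nat) : Int) = digChars number.toNat := by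
      rw [PySem.Int.toChars, if_neg (by omega)]
      simp only [Int.toNat_natCast]
      exact toDigits_eq_digChars _ hpos
    rw [hch]
    simp
  · rw [countLoopA, dif_neg h]
    simp [if_neg h]
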